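-- pv_equiv track=rewrite | github.com/AS1624/canvas-tui | mdParser.py | excaped
-- ===== SOURCE A (Python) =====
-- specialChars = ['*', '_', '/', '-', '\\']
--
-- def excaped(string: str) -> str:
--     output = ""
--     for char in string:
--         if char in specialChars:
--             output += "\\"
--         elif not char.isascii():
--             char = ""
--         output += char
--     return output
-- ===== SOURCE B (Python) =====
-- specialChars = ['*', '_', '/', '-', '\\']
--
-- _table = str.maketrans({c: '\\' + c for c in specialChars})
--
-- def excaped(string: str) -> str:
--     clean = string.encode('ascii', 'ignore').decode('ascii')
--     return clean.translate(_table)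
-- ===== Notes on version B (the rewrite author's own statement) =====
-- stated objective: faster
-- what changed: Replaces the per-character Python loop with membership branching by a C-level ascii encode/ignore filter followed by a precomputed str.translate escape table.
import Mathlib
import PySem

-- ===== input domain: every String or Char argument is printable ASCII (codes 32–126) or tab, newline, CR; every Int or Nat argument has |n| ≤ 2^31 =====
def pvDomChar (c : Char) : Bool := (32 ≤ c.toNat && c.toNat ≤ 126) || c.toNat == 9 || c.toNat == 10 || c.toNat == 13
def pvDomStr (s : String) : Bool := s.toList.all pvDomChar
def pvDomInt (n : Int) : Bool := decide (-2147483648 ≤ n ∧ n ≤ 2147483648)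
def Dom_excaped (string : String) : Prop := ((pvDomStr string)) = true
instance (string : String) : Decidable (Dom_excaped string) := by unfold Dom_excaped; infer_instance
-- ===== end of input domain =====

-- B replaces A's per-char loop with an ASCII filter pass followed by a per-char escape table map (idiomatic, no membership branch loop).

-- ===== PORT A =====
def excapedSpecialChars : List Char := ['*', '_', '/', '-', '\\']

-- A's loop: accumulate output string, appending "\\" before special chars, dropping non-ASCII chars.
def excapedLoop (acc : String) (cs : List Char) : String :=
  match cs with
  | [] => acc
  | c :: rest =>
      if c ∈ excapedSpecialChars then
        excapedLoop (acc ++ String.ofList ['\\'] ++ String.ofList [c]) rest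
      else if ¬ (c.toNat < 128) then
        -- char = ""; output += char
        excapedLoop (acc ++ "") rest
      else
        excapedLoop (acc ++ String.ofList [c]) rest

def excaped (string : String) : String := excapedLoop "" string.toList

-- ===== PORT B =====
-- escape table: each special char maps to backslash + itself; others map to themselves
def excapedEsc (c : Char) : List Char :=
  if c ∈ excapedSpecialChars then ['\\', c] else [c]

def excaped_alt (string : String) : String :=
  String.ofList (((string.toList.filter (fun c => c.toNat < 128)).flatMap excapedEsc))

-- ===== PRECONDITION & SPEC =====
def Spec_excaped (string : String) (out : String) : Prop := out = excaped_alt string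
instance (string : String) (out : String) : Decidable (Spec_excaped string out) := by unfold Spec_excaped; infer_instance

-- ===== CLAIM (what is proved, stated in full; the proofs are below) =====
def Claim_equal_excaped : Prop := ∀ (string : String), Dom_excaped string → Spec_excaped string (excaped string)

-- ===== LEMMAS AND PROOFS =====
theorem excapedLoop_eq (cs : List Char) (acc : String) :
    excapedLoop acc cs = acc ++ String.ofList ((cs.filter (fun c => c.toNat < 128)).flatMap excapedEsc) := by
  induction cs generalizing acc with
  | nil =>
    have h : String.ofList ([] : List Char) = "" := rfl
    simp [excapedLoop, h]
  | cons c rest ih =>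
    by_cases hs : c ∈ excapedSpecialChars
    · have hlt : decide (c.toNat < 128) = true := by fin_cases hs <;> decide
      rw [show excapedLoop acc (c :: rest)
            = excapedLoop (acc ++ String.ofList ['\\'] ++ String.ofList [c]) rest from by
          simp [excapedLoop, hs]]
      rw [ih, List.filter_cons]
      simp only [hlt, if_true, List.flatMap_cons, excapedEsc, if_pos hs,
        String.append_assoc, ← String.ofList_append]
      simp
    · by_cases ha : c.toNat < 128
      · have hd : decide (c.toNat < 128) = true := by simpa using ha
        rw [show excapedLoop acc (c :: rest)
              = excapedLoop (acc ++ String.ofList [c]) rest from by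
            simp [excapedLoop, hs, ha]]
        rw [ih, List.filter_cons]
        simp only [hd, if_true, List.flatMap_cons, excapedEsc, if_neg hs,
          String.append_assoc, ← String.ofList_append]
      · have hd : decide (c.toNat < 128) = false := by simpa using ha
        rw [show excapedLoop acc (c :: rest) = excapedLoop (acc ++ "") rest from by
            simp [excapedLoop, hs, ha]]
        rw [ih, List.filter_cons]
        simp [hd]

-- ===== VERDICT (by name: the statement is the Claim_ definition above) =====
theorem excaped_spec : Claim_equal_excaped := by
  intro s _
  unfold Spec_excaped excaped excaped_alt
  simpa using excapedLoop_eq s.toList ""
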